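-- pv_equiv track=rewrite | github.com/Chico0902/TIL | Algo/CHiCO/24.08/08.07/BOJ_1288_바닥장식.py | count_wooden_boards
-- ===== SOURCE A (Python) =====
-- def count_wooden_boards(N, M, floor):
--     board_count = 0
--
--     for i in range(N):
--         for j in range(M):
--             # Check horizontal board (row-wise)
--             if floor[i][j] == '-':
--                 board_count += 1
--                 k = j
--                 while k < M and floor[i][k] == '-':
--                     floor[i][k] = '.'  # Mark as visited
--                     k += 1
--
--             # Check vertical board (column-wise)
--             if floor[i][j] == '|':
--                 board_count += 1
--                 k = i
--                 while k < N and floor[k][j] == '|':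
--                     floor[k][j] = '.'  # Mark as visited
--                     k += 1
--
--     return board_count
-- ===== SOURCE B (Python) =====
-- def count_wooden_boards(N, M, floor):
--     # NOTE: A mutates `floor` in place (clears board cells to '.'); the
--     # equivalence claimed here is about the RETURN value only — B leaves
--     # `floor` unmodified and counts run starts on the original grid.
--     total = 0
--     # horizontal boards: one pass per row with a previous-cell flag
--     for i in range(N):
--         prev = False
--         for j in range(M):
--             cur = floor[i][j] == '-'
--             if cur and not prev:
--                 total += 1
--             prev = cur
--     # vertical boards: one pass per column with a previous-cell flag
--     # (skip when there are no rows: each column scan would be empty)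
--     if N > 0:
--         for j in range(M):
--             prev = False
--             for i in range(N):
--                 cur = floor[i][j] == '|'
--                 if cur and not prev:
--                     total += 1
--                 prev = cur
--     return total
-- ===== Notes on version B (the rewrite author's own statement) =====
-- stated objective: simpler
-- what changed: A scans every cell and, at each board cell, runs an inner while loop that overwrites the whole run with '.' so later cells of the run are not re-counted; B does no mutation and no inner loops: it counts horizontal run starts row by row and vertical run starts column by column with a previous-cell flag, returning the same total (equivalence is about the return value; A clears board cells in place, B leaves floor untouched).
import Mathlib
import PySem

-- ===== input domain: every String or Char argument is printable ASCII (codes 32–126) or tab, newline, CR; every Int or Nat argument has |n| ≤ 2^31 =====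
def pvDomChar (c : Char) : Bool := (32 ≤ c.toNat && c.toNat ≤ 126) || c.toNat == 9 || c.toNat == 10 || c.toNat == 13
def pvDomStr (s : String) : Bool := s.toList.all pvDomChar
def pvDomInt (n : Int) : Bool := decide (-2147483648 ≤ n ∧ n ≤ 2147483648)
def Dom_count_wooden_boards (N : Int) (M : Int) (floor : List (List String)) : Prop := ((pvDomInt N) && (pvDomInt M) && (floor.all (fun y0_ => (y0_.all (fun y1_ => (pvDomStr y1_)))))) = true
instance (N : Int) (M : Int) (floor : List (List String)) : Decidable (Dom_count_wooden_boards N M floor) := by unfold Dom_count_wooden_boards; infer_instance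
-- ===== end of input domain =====

-- B counts horizontal/vertical run starts with a previous-cell flag instead of A's
-- mutate-and-rescan; equivalence is about the RETURN value only (A clears board cells
-- of `floor` to '.' in place, B leaves `floor` unmodified).

-- ===== PORT A =====
-- indices reached by A's loops are always ≥ 0; an out-of-range access (IndexError in
-- Python) is excluded by Pre_, so the `getD`-style cell accessors below are exact there.
def pvGetCell (fl : List (List String)) (i k : Int) : String :=
  (fl.getD i.toNat []).getD k.toNat ""

def pvSetCell (fl : List (List String)) (i k : Int) (v : String) : List (List String) :=
  fl.set i.toNat ((fl.getD i.toNat []).set k.toNat v)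

-- `while k < M and floor[i][k] == '-': floor[i][k] = '.'; k += 1`
def pvClearH (fl : List (List String)) (i M k : Int) : List (List String) :=
  if h : k < M ∧ pvGetCell fl i k = "-" then pvClearH (pvSetCell fl i k ".") i M (k + 1) else fl
termination_by (M - k).toNat
decreasing_by omega

-- `while k < N and floor[k][j] == '|': floor[k][j] = '.'; k += 1`
def pvClearV (fl : List (List String)) (j N k : Int) : List (List String) :=
  if h : k < N ∧ pvGetCell fl k j = "|" then pvClearV (pvSetCell fl k j ".") j N (k + 1) else fl
termination_by (N - k).toNat
decreasing_by omega

-- the body of A's double loop, on state (floor, board_count)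
def pvStep (N M : Int) (st : List (List String) × Int) (i j : Int) : List (List String) × Int :=
  let st1 := if pvGetCell st.1 i j = "-" then (pvClearH st.1 i M j, st.2 + 1) else st
  if pvGetCell st1.1 i j = "|" then (pvClearV st1.1 j N i, st1.2 + 1) else st1

def count_wooden_boards (N : Int) (M : Int) (floor : List (List String)) : Int :=
  ((PySem.List.pyRange 0 N 1).foldl
    (fun st i => (PySem.List.pyRange 0 M 1).foldl (fun st' j => pvStep N M st' i j) st)
    (floor, 0)).2

-- ===== PORT B =====
-- row pass of Source B: state (prev, total)
def pvRowStep (floor : List (List String)) (i : Int) (st : Bool × Int) (j : Int) : Bool × Int :=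
  let cur := pvGetCell floor i j == "-"
  (cur, if cur && !st.1 then st.2 + 1 else st.2)

-- column pass of Source B: state (prev, total)
def pvColStep (floor : List (List String)) (j : Int) (st : Bool × Int) (i : Int) : Bool × Int :=
  let cur := pvGetCell floor i j == "|"
  (cur, if cur && !st.1 then st.2 + 1 else st.2)

def count_wooden_boards_alt (N : Int) (M : Int) (floor : List (List String)) : Int :=
  let t1 := (PySem.List.pyRange 0 N 1).foldl
    (fun acc i => ((PySem.List.pyRange 0 M 1).foldl (pvRowStep floor i) (false, acc)).2) 0
  if 0 < N then
    (PySem.List.pyRange 0 M 1).foldl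
      (fun acc j => ((PySem.List.pyRange 0 N 1).foldl (pvColStep floor j) (false, acc)).2) t1
  else t1

-- ===== PRECONDITION & SPEC =====
-- Pre_ excludes exactly the inputs where Python A raises IndexError: when the column
-- loop is nonempty (0 < M) A indexes the first N rows, and each of those rows at
-- columns 0..M-1.
def Pre_count_wooden_boards (N : Int) (M : Int) (floor : List (List String)) : Prop :=
  (0 < M → N ≤ (floor.length : Int)) ∧ ∀ row ∈ floor.take N.toNat, M ≤ (row.length : Int)

instance (N : Int) (M : Int) (floor : List (List String)) : Decidable (Pre_count_wooden_boards N M floor) := by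
  unfold Pre_count_wooden_boards; infer_instance

def pvWitness_count_wooden_boards : Int × Int × List (List String) :=
  (2, 3, [["-", "-", "|"], [".", "x", "|"]])

def Spec_count_wooden_boards (N : Int) (M : Int) (floor : List (List String)) (out : Int) : Prop := out = count_wooden_boards_alt N M floor
instance (N : Int) (M : Int) (floor : List (List String)) (out : Int) : Decidable (Spec_count_wooden_boards N M floor out) := by unfold Spec_count_wooden_boards; infer_instance

-- ===== CLAIM (what is proved, stated in full; the proofs are below) =====
def Claim_equal_count_wooden_boards : Prop := ∀ (N : Int) (M : Int) (floor : List (List String)), Dom_count_wooden_boards N M floor → Pre_count_wooden_boards N M floor → Spec_count_wooden_boards N M floor (count_wooden_boards N M floor)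

-- ===== LEMMAS AND PROOFS =====

-- cell read at Nat coordinates of the ORIGINAL grid ("" outside the grid)
def cg (g : List (List String)) (r c : Nat) : String := (g.getD r []).getD c ""

-- leftmost column of the contiguous '-' run of row i ending at column c
def hstart (g : List (List String)) (i : Nat) : Nat → Nat
  | 0 => 0
  | c + 1 => if cg g i c = "-" then hstart g i c else c + 1

-- topmost row of the contiguous '|' run of column j ending at row r
def vstart (g : List (List String)) (j : Nat) : Nat → Nat
  | 0 => 0
  | r + 1 => if cg g r j = "|" then vstart g j r else r + 1

-- grid g with the cells selected by f overwritten by "."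
def markW (g : List (List String)) (f : Nat → Nat → Bool) : List (List String) :=
  g.mapIdx fun r row => row.mapIdx fun c v => if f r c then "." else v

-- cells cleared by A just before it processes cell (i, j) (all lexicographically
-- earlier cells of the N×M window processed)
def clrd (g : List (List String)) (N M : Int) (i j r c : Nat) : Bool :=
  (decide (cg g r c = "-") && decide ((c : Int) < M) &&
    (decide (r < i) || (decide (r = i) && decide (hstart g r c < j)))) ||
  (decide (cg g r c = "|") && decide ((c : Int) < M) && decide ((r : Int) < N) &&
    (decide (vstart g c r < i) || (decide (vstart g c r = i) && decide (c < j))))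

-- clrd plus the cells already blanked by the horizontal while loop running at (i, j),
-- its cursor being at column k
def clrdH (g : List (List String)) (N M : Int) (i j k r c : Nat) : Bool :=
  clrd g N M i j r c || (decide (r = i) && decide (j ≤ c) && decide (c < k) && decide (cg g r c = "-"))

def clrdV (g : List (List String)) (N M : Int) (i j k r c : Nat) : Bool :=
  clrd g N M i j r c || (decide (c = j) && decide (i ≤ r) && decide (r < k) && decide (cg g r c = "|"))

-- per-cell contributions to the count
def hsInd (g : List (List String)) (i j : Nat) : Int :=
  if cg g i j = "-" ∧ hstart g i j = j then 1 else 0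
def vsInd (g : List (List String)) (i j : Nat) : Int :=
  if cg g i j = "|" ∧ vstart g j i = i then 1 else 0

-- basic getter facts
theorem cg_oob (g : List (List String)) (r c : Nat)
    (h : ¬ (r < g.length ∧ c < (g.getD r []).length)) : cg g r c = "" := by
  unfold cg
  rcases Nat.lt_or_ge r g.length with hr | hr
  · have hc : ¬ c < (g.getD r []).length := by tauto
    exact List.getD_eq_default _ _ (Nat.le_of_not_lt hc)
  · rw [List.getD_eq_default _ _ hr]
    simp [List.getD]
theorem cg_ne_inb (g : List (List String)) (r c : Nat) (h : cg g r c ≠ "") :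
    r < g.length ∧ c < (g.getD r []).length := by
  by_contra hc; exact h (cg_oob g r c hc)

theorem grid_ext (g1 g2 : List (List String))
    (hl : g1.length = g2.length)
    (hr : ∀ r, (g1.getD r []).length = (g2.getD r []).length)
    (hc : ∀ r c, cg g1 r c = cg g2 r c) : g1 = g2 := by
  apply List.ext_getElem hl
  intro i h1 h2
  have hri := hr i
  rw [List.getD_eq_getElem _ _ h1, List.getD_eq_getElem _ _ h2] at hri
  apply List.ext_getElem hri
  intro j hj1 hj2
  have := hc i j
  unfold cg at this
  rwa [List.getD_eq_getElem _ _ h1, List.getD_eq_getElem _ _ h2,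
      List.getD_eq_getElem _ _ hj1, List.getD_eq_getElem _ _ hj2] at this

theorem markW_length (g : List (List String)) (f : Nat → Nat → Bool) :
    (markW g f).length = g.length := by simp [markW]

theorem getD_markW (g : List (List String)) (f : Nat → Nat → Bool) (r : Nat) :
    (markW g f).getD r [] = ((g.getD r []).mapIdx fun c v => if f r c then "." else v) := by
  rcases Nat.lt_or_ge r g.length with hr | hr
  · rw [List.getD_eq_getElem _ _ (by simpa [markW_length] using hr),
        List.getD_eq_getElem _ _ hr]
    simp [markW]
  · rw [List.getD_eq_default _ _ (by simpa [markW_length] using hr),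
        List.getD_eq_default _ _ hr]
    simp

theorem cg_markW_raw (g : List (List String)) (f : Nat → Nat → Bool) (r c : Nat) :
    cg (markW g f) r c =
      if c < (g.getD r []).length ∧ f r c then "." else cg g r c := by
  conv_lhs => unfold cg
  rw [getD_markW]
  rcases Nat.lt_or_ge c (g.getD r []).length with hc | hc
  · rw [List.getD_eq_getElem _ _ (by simpa using hc), List.getElem_mapIdx]
    unfold cg
    rw [List.getD_eq_getElem _ _ hc]
    by_cases hf : f r c = true
    · rw [if_pos hf, if_pos ⟨hc, hf⟩]
    · rw [if_neg hf, if_neg (by intro hh; exact hf hh.2)]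
  · rw [List.getD_eq_default _ _ (by simpa using hc)]
    rw [if_neg (by omega)]
    unfold cg
    rw [List.getD_eq_default _ _ hc]

theorem cg_markW (g : List (List String)) (f : Nat → Nat → Bool)
    (hf : ∀ r c, f r c = true → cg g r c ≠ "") (r c : Nat) :
    cg (markW g f) r c = if f r c then "." else cg g r c := by
  rw [cg_markW_raw]
  by_cases hfc : f r c = true
  · have hinb := cg_ne_inb g r c (hf r c hfc)
    rw [if_pos ⟨hinb.2, hfc⟩, if_pos hfc]
  · simp [hfc]

theorem markW_congr (g : List (List String)) (f1 f2 : Nat → Nat → Bool)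
    (h : ∀ r c, f1 r c = f2 r c) : markW g f1 = markW g f2 := by
  unfold markW
  congr 1
  funext r row
  congr 1
  funext c v
  rw [h]

theorem mapIdx_id_pv {α : Type} (l : List α) : (l.mapIdx fun _ a => a) = l := by
  apply List.ext_getElem (by simp)
  intro i h1 h2; simp

theorem markW_false (g : List (List String)) (f : Nat → Nat → Bool)
    (h : ∀ r c, f r c = false) : markW g f = g := by
  unfold markW
  calc g.mapIdx (fun r row => row.mapIdx fun c v => if f r c then "." else v)
      = g.mapIdx (fun _ row => row.mapIdx fun _ v => v) := by
        congr 1; funext r row; congr 1; funext c v; simp [h]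
    _ = g.mapIdx (fun _ row => row) := by
        congr 1; funext r row; exact mapIdx_id_pv row
    _ = g := mapIdx_id_pv g

theorem length_setCell (fl : List (List String)) (i k : Int) (v : String) :
    (pvSetCell fl i k v).length = fl.length := by simp [pvSetCell]

theorem getD_setCell (fl : List (List String)) (i k : Int) (v : String) (r : Nat) :
    (pvSetCell fl i k v).getD r [] =
      if r = i.toNat ∧ i.toNat < fl.length then (fl.getD i.toNat []).set k.toNat v
      else fl.getD r [] := by
  unfold pvSetCell
  by_cases h : r = i.toNat ∧ i.toNat < fl.length
  · rw [if_pos h, h.1]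
    have hlen : i.toNat < (fl.set i.toNat ((fl.getD i.toNat []).set k.toNat v)).length := by
      simpa using h.2
    rw [List.getD_eq_getElem _ _ hlen, List.getElem_set_self]
  · rw [if_neg h]
    rcases Nat.lt_or_ge r fl.length with hrl | hrl
    · rw [List.getD_eq_getElem _ _ (by simpa using hrl), List.getD_eq_getElem _ _ hrl]
      rw [List.getElem_set]
      have : ¬ i.toNat = r := by
        intro he; exact h ⟨he.symm, he ▸ hrl⟩
      rw [if_neg this]
    · rw [List.getD_eq_default _ _ (by simpa using hrl), List.getD_eq_default _ _ hrl]

theorem cg_setCell (fl : List (List String)) (i k : Nat) (v : String) (r c : Nat) :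
    cg (pvSetCell fl (i : Int) (k : Int) v) r c =
      if r = i ∧ c = k ∧ i < fl.length ∧ k < (fl.getD i []).length then v
      else cg fl r c := by
  unfold cg
  rw [getD_setCell]
  simp only [Int.toNat_natCast]
  by_cases hri : r = i ∧ i < fl.length
  · rw [if_pos hri]
    rcases hri with ⟨hri, hil⟩
    subst hri
    rcases Nat.lt_or_ge c (fl.getD r []).length with hcl | hcl
    · rw [List.getD_eq_getElem _ _ (show c < ((fl.getD r []).set k v).length by simpa using hcl)]
      simp only [Int.toNat_natCast]
      rw [List.getElem_set]
      by_cases hck : k = c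
      · subst hck
        rw [if_pos rfl, if_pos ⟨by trivial, by trivial, hil, hcl⟩]
      · rw [if_neg hck, if_neg (by intro hh; exact hck hh.2.1.symm)]
        rw [List.getD_eq_getElem _ _ hcl]
    · rw [List.getD_eq_default _ _ (by simpa using hcl)]
      rw [if_neg (by intro hh; omega)]
      rw [List.getD_eq_default _ _ hcl]
  · rw [if_neg hri]
    rw [if_neg (by intro hh; exact hri ⟨hh.1, hh.2.2.1⟩)]

theorem setCell_markW (g : List (List String)) (f : Nat → Nat → Bool) (r c : Nat) :
    pvSetCell (markW g f) (r : Int) (c : Int) "." =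
      markW g (fun r' c' => f r' c' || (decide (r' = r) && decide (c' = c))) := by
  apply grid_ext
  · simp [length_setCell, markW_length]
  · intro r'
    rw [getD_setCell]
    simp only [Int.toNat_natCast, getD_markW]
    split_ifs with h
    · rcases h with ⟨h1, h2⟩; subst h1; simp
    · simp
  · intro r' c'
    have hrowlen : ((markW g f).getD r []).length = (g.getD r []).length := by
      rw [getD_markW]; simp
    rw [cg_setCell, cg_markW_raw, cg_markW_raw, markW_length, hrowlen]
    by_cases h : r' = r ∧ c' = c ∧ r < g.length ∧ c < (g.getD r []).length
    · rw [if_pos h]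
      rcases h with ⟨h1, h2, h3, h4⟩
      subst h1; subst h2
      rw [if_pos ⟨h4, by simp⟩]
    · rw [if_neg h]
      by_cases hin : c' < (g.getD r' []).length
      · simp only [hin, true_and]
        by_cases hf : f r' c' = true
        · simp [hf]
        · simp only [hf, Bool.false_or]
          have hr'len : r' < g.length := by
            by_contra hrz
            rw [List.getD_eq_default _ _ (Nat.le_of_not_lt hrz)] at hin
            simp at hin
          have hne : ¬ (r' = r ∧ c' = c) := by
            intro ⟨e1, e2⟩
            subst e1; subst e2
            exact h ⟨rfl, rfl, hr'len, hin⟩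
          simp [hf, hne]
      · have hin' : ¬ c' < (g[r']?.getD []).length := by simpa [List.getD] using hin
        simp [hin']
theorem pvGetCell_cg (fl : List (List String)) (r c : Nat) :
    pvGetCell fl (r : Int) (c : Int) = cg fl r c := by
  simp [pvGetCell, cg]

theorem hstart_le (g : List (List String)) (i : Nat) : ∀ c, hstart g i c ≤ c := by
  intro c
  induction c with
  | zero => simp [hstart]
  | succ c ih =>
    unfold hstart
    split_ifs with h
    · omega
    · omega

theorem hstart_run (g : List (List String)) (i : Nat) :
    ∀ c t, hstart g i c ≤ t → t < c → cg g i t = "-" := by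
  intro c
  induction c with
  | zero => intro t _ ht; omega
  | succ c ih =>
    intro t h1 h2
    by_cases hc : cg g i c = "-"
    · rw [hstart, if_pos hc] at h1
      rcases Nat.lt_or_ge t c with ht | ht
      · exact ih t h1 ht
      · have : t = c := by omega
        rwa [this]
    · rw [hstart, if_neg hc] at h1
      omega

theorem hstart_chain (g : List (List String)) (i : Nat) :
    ∀ c j, j ≤ c → hstart g i c = j → hstart g i j = j := by
  intro c
  induction c with
  | zero => intro j h1 h2; have : j = 0 := by omega
            subst this; simp [hstart]
  | succ c ih =>
    intro j h1 h2
    by_cases hj : j = c + 1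
    · rwa [← hj] at h2
    · by_cases hc : cg g i c = "-"
      · rw [hstart, if_pos hc] at h2
        exact ih j (by have := hstart_le g i c; omega) h2
      · rw [hstart, if_neg hc] at h2
        omega

theorem hstart_seg (g : List (List String)) (i j : Nat) (hst : hstart g i j = j) :
    ∀ c, j ≤ c → (∀ t, j ≤ t → t < c → cg g i t = "-") → hstart g i c = j := by
  intro c
  induction c with
  | zero => intro h1 _; have : j = 0 := by omega
            subst this; exact hst
  | succ c ih =>
    intro h1 h2
    by_cases hj : j = c + 1
    · subst hj; exact hst
    · have hjc : j ≤ c := by omega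
      rw [hstart, if_pos (h2 c hjc (by omega))]
      exact ih hjc (fun t ht1 ht2 => h2 t ht1 (by omega))

theorem hstart_eq_self_iff (g : List (List String)) (i : Nat) (c : Nat) :
    hstart g i c = c ↔ (c = 0 ∨ cg g i (c - 1) ≠ "-") := by
  cases c with
  | zero => simp [hstart]
  | succ c =>
    rw [hstart]
    split_ifs with h
    · have := hstart_le g i c
      constructor
      · intro he; exact absurd he (by omega)
      · intro he
        rcases he with he | he
        · exact he.elim
        · simp at he; exact absurd h he
    · constructor
      · intro _; right; simpa using h
      · intro _; rfl

theorem vstart_le (g : List (List String)) (j : Nat) : ∀ r, vstart g j r ≤ r := by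
  intro r
  induction r with
  | zero => simp [vstart]
  | succ r ih =>
    unfold vstart
    split_ifs with h
    · omega
    · omega

theorem vstart_run (g : List (List String)) (j : Nat) :
    ∀ r t, vstart g j r ≤ t → t < r → cg g t j = "|" := by
  intro r
  induction r with
  | zero => intro t _ ht; omega
  | succ r ih =>
    intro t h1 h2
    by_cases hc : cg g r j = "|"
    · rw [vstart, if_pos hc] at h1
      rcases Nat.lt_or_ge t r with ht | ht
      · exact ih t h1 ht
      · have : t = r := by omega
        rwa [this]
    · rw [vstart, if_neg hc] at h1
      omega

theorem vstart_chain (g : List (List String)) (j : Nat) :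
    ∀ r i, i ≤ r → vstart g j r = i → vstart g j i = i := by
  intro r
  induction r with
  | zero => intro i h1 h2; have : i = 0 := by omega
            subst this; simp [vstart]
  | succ r ih =>
    intro i h1 h2
    by_cases hi : i = r + 1
    · rwa [← hi] at h2
    · by_cases hc : cg g r j = "|"
      · rw [vstart, if_pos hc] at h2
        exact ih i (by have := vstart_le g j r; omega) h2
      · rw [vstart, if_neg hc] at h2
        omega

theorem vstart_seg (g : List (List String)) (j i : Nat) (hst : vstart g j i = i) :
    ∀ r, i ≤ r → (∀ t, i ≤ t → t < r → cg g t j = "|") → vstart g j r = i := by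
  intro r
  induction r with
  | zero => intro h1 _; have : i = 0 := by omega
            subst this; exact hst
  | succ r ih =>
    intro h1 h2
    by_cases hi : i = r + 1
    · subst hi; exact hst
    · have hir : i ≤ r := by omega
      rw [vstart, if_pos (h2 r hir (by omega))]
      exact ih hir (fun t ht1 ht2 => h2 t ht1 (by omega))

theorem vstart_eq_self_iff (g : List (List String)) (j : Nat) (r : Nat) :
    vstart g j r = r ↔ (r = 0 ∨ cg g (r - 1) j ≠ "|") := by
  cases r with
  | zero => simp [vstart]
  | succ r =>
    rw [vstart]
    split_ifs with h
    · have := vstart_le g j r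
      constructor
      · intro he; exact absurd he (by omega)
      · intro he
        rcases he with he | he
        · exact he.elim
        · simp at he; exact absurd h he
    · constructor
      · intro _; right; simpa using h
      · intro _; rfl

-- propositional views of the cleared-cell predicates
theorem clrd_iff (g : List (List String)) (N M : Int) (i j r c : Nat) :
    clrd g N M i j r c = true ↔
      ((cg g r c = "-" ∧ (c : Int) < M ∧ (r < i ∨ (r = i ∧ hstart g r c < j))) ∨
       (cg g r c = "|" ∧ (c : Int) < M ∧ (r : Int) < N ∧
         (vstart g c r < i ∨ (vstart g c r = i ∧ c < j)))) := by
  simp [clrd]; tauto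

theorem clrdH_iff (g : List (List String)) (N M : Int) (i j k r c : Nat) :
    clrdH g N M i j k r c = true ↔
      (clrd g N M i j r c = true ∨ (r = i ∧ j ≤ c ∧ c < k ∧ cg g r c = "-")) := by
  simp [clrdH]; tauto

theorem clrdV_iff (g : List (List String)) (N M : Int) (i j k r c : Nat) :
    clrdV g N M i j k r c = true ↔
      (clrd g N M i j r c = true ∨ (c = j ∧ i ≤ r ∧ r < k ∧ cg g r c = "|")) := by
  simp [clrdV]; tauto

theorem clrd_ne (g : List (List String)) (N M : Int) (i j : Nat) :
    ∀ r c, clrd g N M i j r c = true → cg g r c ≠ "" := by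
  intro r c h
  rcases (clrd_iff g N M i j r c).mp h with h | h
  · rw [h.1]; decide
  · rw [h.1]; decide

theorem clrdH_ne (g : List (List String)) (N M : Int) (i j k : Nat) :
    ∀ r c, clrdH g N M i j k r c = true → cg g r c ≠ "" := by
  intro r c h
  rcases (clrdH_iff g N M i j k r c).mp h with h | h
  · exact clrd_ne g N M i j r c h
  · rw [h.2.2.2]; decide

theorem clrdV_ne (g : List (List String)) (N M : Int) (i j k : Nat) :
    ∀ r c, clrdV g N M i j k r c = true → cg g r c ≠ "" := by
  intro r c h
  rcases (clrdV_iff g N M i j k r c).mp h with h | h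
  · exact clrd_ne g N M i j r c h
  · rw [h.2.2.2]; decide
theorem clrdH_exit (g : List (List String)) (N M : Int) (i j k : Nat)
    (hjM : (j : Int) < M) (hcg : cg g i j = "-") (hst : hstart g i j = j)
    (hjk : j ≤ k) (hkM : k ≤ M.toNat)
    (hrun : ∀ c, j ≤ c → c < k → cg g i c = "-")
    (hstop : k = M.toNat ∨ cg g i k ≠ "-") :
    ∀ r c, clrdH g N M i j k r c = clrd g N M i (j + 1) r c := by
  intro r c
  rw [Bool.eq_iff_iff, clrdH_iff, clrd_iff, clrd_iff]
  constructor
  · rintro (h | h)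
    · rcases h with ⟨h1, h2, h3⟩ | ⟨h1, h2, h3, h4⟩
      · exact Or.inl ⟨h1, h2, by omega⟩
      · exact Or.inr ⟨h1, h2, h3, by omega⟩
    · rcases h with ⟨hei, hjc, hck, hcm⟩
      subst hei
      refine Or.inl ⟨hcm, by omega, Or.inr ⟨rfl, ?_⟩⟩
      have : hstart g r c = j :=
        hstart_seg g r j hst c hjc (fun t ht1 ht2 => hrun t ht1 (by omega))
      omega
  · rintro (⟨h1, h2, h3⟩ | ⟨h1, h2, h3, h4⟩)
    · rcases h3 with h3 | ⟨h3, h4⟩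
      · exact Or.inl (Or.inl ⟨h1, h2, Or.inl h3⟩)
      · subst h3
        rcases Nat.lt_or_ge (hstart g r c) j with h5 | h5
        · exact Or.inl (Or.inl ⟨h1, h2, Or.inr ⟨rfl, h5⟩⟩)
        · have h6 : hstart g r c = j := by omega
          have hjc : j ≤ c := by have := hstart_le g r c; omega
          refine Or.inr ⟨rfl, hjc, ?_, h1⟩
          by_contra hck
          rcases hstop with hs | hs
          · omega
          · rcases Nat.lt_or_ge k c with hkc | hkc
            · exact hs (hstart_run g r c k (by omega) hkc)
            · have : k = c := by omega
              subst this; exact hs h1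
    · rcases h4 with h4 | ⟨h4, h5⟩
      · exact Or.inl (Or.inr ⟨h1, h2, h3, Or.inl h4⟩)
      · rcases Nat.lt_or_ge c j with h6 | h6
        · exact Or.inl (Or.inr ⟨h1, h2, h3, Or.inr ⟨h4, h6⟩⟩)
        · -- c = j: impossible, the run start (i, j) holds '-', not '|'
          have hcj : c = j := by omega
          subst hcj
          exfalso
          rcases Nat.lt_or_ge i r with hir | hir
          · have := vstart_run g c r i (by omega) hir
            rw [this] at hcg; exact absurd hcg (by decide)
          · have hri : r = i := by have := vstart_le g c r; omega
            subst hri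
            rw [h1] at hcg; exact absurd hcg (by decide)

theorem pvClearH_run (g : List (List String)) (N M : Int) (i j : Nat)
    (hjM : (j : Int) < M) (hcg : cg g i j = "-") (hst : hstart g i j = j) :
    ∀ d k, j ≤ k → k ≤ M.toNat → M.toNat - k ≤ d →
      (∀ c, j ≤ c → c < k → cg g i c = "-") →
      pvClearH (markW g (clrdH g N M i j k)) (i : Int) M (k : Int) =
        markW g (clrd g N M i (j + 1)) := by
  intro d
  induction d with
  | zero =>
    intro k hjk hkM hd hrun
    have hkM' : k = M.toNat := by omega
    rw [pvClearH]
    rw [dif_neg (by omega)]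
    exact markW_congr g _ _ (clrdH_exit g N M i j k hjM hcg hst hjk hkM hrun (Or.inl hkM'))
  | succ d ih =>
    intro k hjk hkM hd hrun
    rw [pvClearH]
    by_cases hk : k < M.toNat
    · by_cases hcell : cg g i k = "-"
      · have hsk : hstart g i k = j :=
          hstart_seg g i j hst k hjk (fun t ht1 ht2 => hrun t ht1 ht2)
        have hval : pvGetCell (markW g (clrdH g N M i j k)) (i : Int) (k : Int) = "-" := by
          rw [pvGetCell_cg, cg_markW g _ (clrdH_ne g N M i j k) i k]
          rw [if_neg ?_, hcell]
          intro hcl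
          rcases (clrdH_iff g N M i j k i k).mp hcl with hcl | hcl
          · rcases (clrd_iff g N M i j i k).mp hcl with ⟨h1, h2, h3⟩ | ⟨h1, h2, h3, h4⟩
            · rcases h3 with h3 | ⟨_, h3⟩ <;> omega
            · rw [h1] at hcell; exact absurd hcell (by decide)
          · omega
        rw [dif_pos ⟨by omega, hval⟩]
        rw [setCell_markW]
        have hcongr : markW g (fun r' c' => clrdH g N M i j k r' c' ||
            (decide (r' = i) && decide (c' = k))) = markW g (clrdH g N M i j (k + 1)) := by
          apply markW_congr
          intro r c
          rw [Bool.eq_iff_iff, clrdH_iff]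
          simp only [Bool.or_eq_true, Bool.and_eq_true, decide_eq_true_eq, clrdH_iff]
          constructor
          · rintro ((h | h) | ⟨he1, he2⟩)
            · exact Or.inl h
            · exact Or.inr ⟨h.1, h.2.1, by omega, h.2.2.2⟩
            · subst he1; subst he2; exact Or.inr ⟨rfl, hjk, by omega, hcell⟩
          · rintro (h | ⟨he1, he2, he3, he4⟩)
            · exact Or.inl (Or.inl h)
            · rcases Nat.lt_or_ge c k with hck | hck
              · exact Or.inl (Or.inr ⟨he1, he2, hck, he4⟩)
              · have : c = k := by omega
                subst this; subst he1; exact Or.inr ⟨rfl, rfl⟩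
        rw [hcongr]
        have : ((k : Int) + 1) = ((k + 1 : Nat) : Int) := by push_cast; ring
        rw [this]
        exact ih (k + 1) (by omega) (by omega) (by omega)
          (fun c hc1 hc2 => by
            rcases Nat.lt_or_ge c k with hck | hck
            · exact hrun c hc1 hck
            · have : c = k := by omega
              subst this; exact hcell)
      · have hval : pvGetCell (markW g (clrdH g N M i j k)) (i : Int) (k : Int) ≠ "-" := by
          rw [pvGetCell_cg, cg_markW g _ (clrdH_ne g N M i j k) i k]
          split_ifs with hcl
          · decide
          · exact hcell
        rw [dif_neg (by intro hh; exact hval hh.2)]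
        exact markW_congr g _ _
          (clrdH_exit g N M i j k hjM hcg hst hjk hkM hrun (Or.inr hcell))
    · rw [dif_neg (by omega)]
      have hkM' : k = M.toNat := by omega
      exact markW_congr g _ _ (clrdH_exit g N M i j k hjM hcg hst hjk hkM hrun (Or.inl hkM'))
theorem clrdV_exit (g : List (List String)) (N M : Int) (i j k : Nat)
    (hjM : (j : Int) < M) (hiN : (i : Int) < N) (hcg : cg g i j = "|")
    (hvst : vstart g j i = i)
    (hik : i ≤ k) (hkN : k ≤ N.toNat)
    (hrun : ∀ r, i ≤ r → r < k → cg g r j = "|")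
    (hstop : k = N.toNat ∨ cg g k j ≠ "|") :
    ∀ r c, clrdV g N M i j k r c = clrd g N M i (j + 1) r c := by
  intro r c
  rw [Bool.eq_iff_iff, clrdV_iff, clrd_iff, clrd_iff]
  constructor
  · rintro (h | h)
    · rcases h with ⟨h1, h2, h3⟩ | ⟨h1, h2, h3, h4⟩
      · exact Or.inl ⟨h1, h2, by omega⟩
      · exact Or.inr ⟨h1, h2, h3, by omega⟩
    · rcases h with ⟨hcj, hir, hrk, hcgr⟩
      subst hcj
      refine Or.inr ⟨hcgr, hjM, by omega, Or.inr ⟨?_, by omega⟩⟩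
      exact vstart_seg g c i hvst r hir (fun t ht1 ht2 => hrun t ht1 (by omega))
  · rintro (⟨h1, h2, h3⟩ | ⟨h1, h2, h3, h4⟩)
    · rcases h3 with h3 | ⟨h3, h4⟩
      · exact Or.inl (Or.inl ⟨h1, h2, Or.inl h3⟩)
      · subst h3
        rcases Nat.lt_or_ge (hstart g r c) j with h5 | h5
        · exact Or.inl (Or.inl ⟨h1, h2, Or.inr ⟨rfl, h5⟩⟩)
        · -- hstart g r c = j: impossible, (r, j) holds '|', not '-'
          have h6 : hstart g r c = j := by omega
          exfalso
          rcases Nat.lt_or_ge j c with hjc | hjc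
          · have := hstart_run g r c j (by omega) hjc
            rw [this] at hcg; exact absurd hcg (by decide)
          · have hcj : c = j := by have := hstart_le g r c; omega
            subst hcj
            rw [h1] at hcg; exact absurd hcg (by decide)
    · rcases h4 with h4 | ⟨h4, h5⟩
      · exact Or.inl (Or.inr ⟨h1, h2, h3, Or.inl h4⟩)
      · rcases Nat.lt_or_ge c j with h6 | h6
        · exact Or.inl (Or.inr ⟨h1, h2, h3, Or.inr ⟨h4, h6⟩⟩)
        · have hcj : c = j := by omega
          subst hcj
          have hir : i ≤ r := by have := vstart_le g c r; omega
          refine Or.inr ⟨rfl, hir, ?_, h1⟩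
          by_contra hrk
          rcases hstop with hs | hs
          · omega
          · rcases Nat.lt_or_ge k r with hkr | hkr
            · exact hs (vstart_run g c r k (by omega) hkr)
            · have : k = r := by omega
              subst this; exact hs h1

theorem pvClearV_run (g : List (List String)) (N M : Int) (i j : Nat)
    (hjM : (j : Int) < M) (hiN : (i : Int) < N) (hcg : cg g i j = "|")
    (hvst : vstart g j i = i) :
    ∀ d k, i ≤ k → k ≤ N.toNat → N.toNat - k ≤ d →
      (∀ r, i ≤ r → r < k → cg g r j = "|") →
      pvClearV (markW g (clrdV g N M i j k)) (j : Int) N (k : Int) =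
        markW g (clrd g N M i (j + 1)) := by
  intro d
  induction d with
  | zero =>
    intro k hik hkN hd hrun
    have hkN' : k = N.toNat := by omega
    rw [pvClearV]
    rw [dif_neg (by omega)]
    exact markW_congr g _ _
      (clrdV_exit g N M i j k hjM hiN hcg hvst hik hkN hrun (Or.inl hkN'))
  | succ d ih =>
    intro k hik hkN hd hrun
    rw [pvClearV]
    by_cases hk : k < N.toNat
    · by_cases hcell : cg g k j = "|"
      · have hsk : vstart g j k = i :=
          vstart_seg g j i hvst k hik (fun t ht1 ht2 => hrun t ht1 ht2)
        have hval : pvGetCell (markW g (clrdV g N M i j k)) (k : Int) (j : Int) = "|" := by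
          rw [pvGetCell_cg, cg_markW g _ (clrdV_ne g N M i j k) k j]
          rw [if_neg ?_, hcell]
          intro hcl
          rcases (clrdV_iff g N M i j k k j).mp hcl with hcl | hcl
          · rcases (clrd_iff g N M i j k j).mp hcl with ⟨h1, h2, h3⟩ | ⟨h1, h2, h3, h4⟩
            · rw [h1] at hcell; exact absurd hcell (by decide)
            · rcases h4 with h4 | ⟨_, h4⟩ <;> omega
          · omega
        rw [dif_pos ⟨by omega, hval⟩]
        rw [setCell_markW]
        have hcongr : markW g (fun r' c' => clrdV g N M i j k r' c' ||
            (decide (r' = k) && decide (c' = j))) = markW g (clrdV g N M i j (k + 1)) := by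
          apply markW_congr
          intro r c
          rw [Bool.eq_iff_iff, clrdV_iff]
          simp only [Bool.or_eq_true, Bool.and_eq_true, decide_eq_true_eq, clrdV_iff]
          constructor
          · rintro ((h | h) | ⟨he1, he2⟩)
            · exact Or.inl h
            · exact Or.inr ⟨h.1, h.2.1, by omega, h.2.2.2⟩
            · subst he1; subst he2; exact Or.inr ⟨rfl, hik, by omega, hcell⟩
          · rintro (h | ⟨he1, he2, he3, he4⟩)
            · exact Or.inl (Or.inl h)
            · rcases Nat.lt_or_ge r k with hrk | hrk
              · exact Or.inl (Or.inr ⟨he1, he2, hrk, he4⟩)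
              · have : r = k := by omega
                subst this; subst he1; exact Or.inr ⟨rfl, rfl⟩
        rw [hcongr]
        have : ((k : Int) + 1) = ((k + 1 : Nat) : Int) := by push_cast; ring
        rw [this]
        exact ih (k + 1) (by omega) (by omega) (by omega)
          (fun r hr1 hr2 => by
            rcases Nat.lt_or_ge r k with hrk | hrk
            · exact hrun r hr1 hrk
            · have : r = k := by omega
              subst this; exact hcell)
      · have hval : pvGetCell (markW g (clrdV g N M i j k)) (k : Int) (j : Int) ≠ "|" := by
          rw [pvGetCell_cg, cg_markW g _ (clrdV_ne g N M i j k) k j]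
          split_ifs with hcl
          · decide
          · exact hcell
        rw [dif_neg (by intro hh; exact hval hh.2)]
        exact markW_congr g _ _
          (clrdV_exit g N M i j k hjM hiN hcg hvst hik hkN hrun (Or.inr hcell))
    · rw [dif_neg (by omega)]
      have hkN' : k = N.toNat := by omega
      exact markW_congr g _ _
        (clrdV_exit g N M i j k hjM hiN hcg hvst hik hkN hrun (Or.inl hkN'))
theorem clrd_succ_eq (g : List (List String)) (N M : Int) (i j : Nat)
    (hH : ¬ (cg g i j = "-" ∧ hstart g i j = j))
    (hV : ¬ (cg g i j = "|" ∧ vstart g j i = i)) :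
    ∀ r c, clrd g N M i j r c = clrd g N M i (j + 1) r c := by
  intro r c
  rw [Bool.eq_iff_iff, clrd_iff, clrd_iff]
  constructor
  · rintro (⟨h1, h2, h3⟩ | ⟨h1, h2, h3, h4⟩)
    · exact Or.inl ⟨h1, h2, by omega⟩
    · exact Or.inr ⟨h1, h2, h3, by omega⟩
  · rintro (⟨h1, h2, h3⟩ | ⟨h1, h2, h3, h4⟩)
    · rcases h3 with h3 | ⟨h3, h4⟩
      · exact Or.inl ⟨h1, h2, Or.inl h3⟩
      · subst h3
        rcases Nat.lt_or_ge (hstart g r c) j with h5 | h5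
        · exact Or.inl ⟨h1, h2, Or.inr ⟨rfl, h5⟩⟩
        · have h6 : hstart g r c = j := by omega
          exfalso
          have hjc : j ≤ c := by have := hstart_le g r c; omega
          rcases Nat.lt_or_ge j c with hjc' | hjc'
          · exact hH ⟨hstart_run g r c j (by omega) hjc', hstart_chain g r c j hjc h6⟩
          · have : c = j := by omega
            subst this
            exact hH ⟨h1, h6⟩
    · rcases h4 with h4 | ⟨h4, h5⟩
      · exact Or.inr ⟨h1, h2, h3, Or.inl h4⟩
      · rcases Nat.lt_or_ge c j with h6 | h6
        · exact Or.inr ⟨h1, h2, h3, Or.inr ⟨h4, h6⟩⟩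
        · have hcj : c = j := by omega
          subst hcj
          exfalso
          have hir : i ≤ r := by have := vstart_le g c r; omega
          rcases Nat.lt_or_ge i r with hir' | hir'
          · exact hV ⟨vstart_run g c r i (by omega) hir', vstart_chain g c r i hir h4⟩
          · have : r = i := by omega
            subst this
            exact hV ⟨h1, h4⟩

theorem clrd_self (g : List (List String)) (N M : Int) (i j : Nat) :
    clrd g N M i j i j = true ↔
      ((cg g i j = "-" ∧ (j : Int) < M ∧ hstart g i j < j) ∨
       (cg g i j = "|" ∧ (j : Int) < M ∧ (i : Int) < N ∧ vstart g j i < i)) := by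
  rw [clrd_iff]
  constructor
  · rintro (⟨h1, h2, h3⟩ | ⟨h1, h2, h3, h4⟩)
    · refine Or.inl ⟨h1, h2, ?_⟩
      rcases h3 with h3 | ⟨_, h3⟩ <;> omega
    · refine Or.inr ⟨h1, h2, h3, ?_⟩
      rcases h4 with h4 | ⟨_, h4⟩ <;> omega
  · rintro (⟨h1, h2, h3⟩ | ⟨h1, h2, h3, h4⟩)
    · exact Or.inl ⟨h1, h2, Or.inr ⟨rfl, h3⟩⟩
    · exact Or.inr ⟨h1, h2, h3, Or.inl h4⟩

theorem pvStep_mark (g : List (List String)) (N M : Int) (i j : Nat) (cnt : Int)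
    (hiN : (i : Int) < N) (hjM : (j : Int) < M) :
    pvStep N M (markW g (clrd g N M i j), cnt) (i : Int) (j : Int) =
      (markW g (clrd g N M i (j + 1)), cnt + (hsInd g i j + vsInd g i j)) := by
  have hcgm : ∀ (jj : Nat), cg (markW g (clrd g N M i jj)) i j =
      if clrd g N M i jj i j then "." else cg g i j :=
    fun jj => cg_markW g _ (clrd_ne g N M i jj) i j
  by_cases hA : cg g i j = "-"
  · by_cases hA1 : hstart g i j = j
    · -- start of a horizontal run
      have hclrd : clrd g N M i j i j = false := by
        rw [Bool.eq_false_iff, Ne, clrd_self]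
        rintro (⟨_, _, h3⟩ | ⟨h1, _, _, _⟩)
        · omega
        · rw [hA] at h1; exact absurd h1 (by decide)
      have hval : pvGetCell (markW g (clrd g N M i j)) (i : Int) (j : Int) = "-" := by
        rw [pvGetCell_cg, hcgm, hclrd]; simpa using hA
      have hHgrid : pvClearH (markW g (clrd g N M i j)) (i : Int) M (j : Int) =
          markW g (clrd g N M i (j + 1)) := by
        have heq : markW g (clrd g N M i j) = markW g (clrdH g N M i j j) := by
          apply markW_congr
          intro r c
          rw [Bool.eq_iff_iff, clrdH_iff]
          constructor
          · exact Or.inl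
          · rintro (h | h)
            · exact h
            · omega
        rw [heq]
        exact pvClearH_run g N M i j hjM hA hA1 (M.toNat - j) j le_rfl (by omega)
          le_rfl (by omega)
      have hval2 : pvGetCell (markW g (clrd g N M i (j + 1))) (i : Int) (j : Int) = "." := by
        rw [pvGetCell_cg, hcgm]
        rw [if_pos (by rw [clrd_iff]; exact Or.inl ⟨hA, hjM, Or.inr ⟨rfl, by omega⟩⟩)]
      have hs : hsInd g i j = 1 := by rw [hsInd, if_pos ⟨hA, hA1⟩]
      have hv : vsInd g i j = 0 := by
        rw [vsInd, if_neg (by rw [hA]; rintro ⟨h, _⟩; exact absurd h (by decide))]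
      simp [pvStep, hval, hHgrid, hval2, hs, hv]
    · -- a '-' cell inside a run: already blanked
      have hclrd : clrd g N M i j i j = true := by
        rw [clrd_self]
        exact Or.inl ⟨hA, hjM, by have := hstart_le g i j; omega⟩
      have hval : pvGetCell (markW g (clrd g N M i j)) (i : Int) (j : Int) = "." := by
        rw [pvGetCell_cg, hcgm, hclrd]; rfl
      have hs : hsInd g i j = 0 := by
        rw [hsInd, if_neg (by rintro ⟨_, h⟩; exact hA1 h)]
      have hv : vsInd g i j = 0 := by
        rw [vsInd, if_neg (by rw [hA]; rintro ⟨h, _⟩; exact absurd h (by decide))]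
      have heq : markW g (clrd g N M i j) = markW g (clrd g N M i (j + 1)) :=
        markW_congr g _ _ (clrd_succ_eq g N M i j (by rintro ⟨_, h⟩; exact hA1 h)
          (by rw [hA]; rintro ⟨h, _⟩; exact absurd h (by decide)))
      rw [← heq]
      simp [pvStep, hval, hs, hv]
  · by_cases hB : cg g i j = "|"
    · by_cases hB1 : vstart g j i = i
      · -- start of a vertical run
        have hclrd : clrd g N M i j i j = false := by
          rw [Bool.eq_false_iff, Ne, clrd_self]
          rintro (⟨h1, _, _⟩ | ⟨_, _, _, h4⟩)
          · exact hA h1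
          · omega
        have hval2 : pvGetCell (markW g (clrd g N M i j)) (i : Int) (j : Int) = "|" := by
          rw [pvGetCell_cg, hcgm, hclrd]; simpa using hB
        have hval1 : ¬ pvGetCell (markW g (clrd g N M i j)) (i : Int) (j : Int) = "-" := by
          rw [hval2]; decide
        have hVgrid : pvClearV (markW g (clrd g N M i j)) (j : Int) N (i : Int) =
            markW g (clrd g N M i (j + 1)) := by
          have heq : markW g (clrd g N M i j) = markW g (clrdV g N M i j i) := by
            apply markW_congr
            intro r c
            rw [Bool.eq_iff_iff, clrdV_iff]
            constructor
            · exact Or.inl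
            · rintro (h | h)
              · exact h
              · omega
          rw [heq]
          exact pvClearV_run g N M i j hjM hiN hB hB1 (N.toNat - i) i le_rfl (by omega)
            le_rfl (by omega)
        have hs : hsInd g i j = 0 := by
          rw [hsInd, if_neg (by rintro ⟨h, _⟩; exact hA h)]
        have hv : vsInd g i j = 1 := by rw [vsInd, if_pos ⟨hB, hB1⟩]
        simp [pvStep, hval1, hval2, hVgrid, hs, hv]
      · -- a '|' cell inside a run: already blanked
        have hclrd : clrd g N M i j i j = true := by
          rw [clrd_self]
          exact Or.inr ⟨hB, hjM, hiN, by have := vstart_le g j i; omega⟩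
        have hval : pvGetCell (markW g (clrd g N M i j)) (i : Int) (j : Int) = "." := by
          rw [pvGetCell_cg, hcgm, hclrd]; rfl
        have hs : hsInd g i j = 0 := by
          rw [hsInd, if_neg (by rintro ⟨h, _⟩; exact hA h)]
        have hv : vsInd g i j = 0 := by
          rw [vsInd, if_neg (by rintro ⟨_, h⟩; exact hB1 h)]
        have heq : markW g (clrd g N M i j) = markW g (clrd g N M i (j + 1)) :=
          markW_congr g _ _ (clrd_succ_eq g N M i j (by rintro ⟨h, _⟩; exact hA h)
            (by rintro ⟨_, h⟩; exact hB1 h))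
        rw [← heq]
        simp [pvStep, hval, hs, hv]
    · -- neither a '-' nor a '|' cell
      have hval0 : pvGetCell (markW g (clrd g N M i j)) (i : Int) (j : Int) =
          (if clrd g N M i j i j then "." else cg g i j) := by
        rw [pvGetCell_cg, hcgm]
      have hval1 : ¬ pvGetCell (markW g (clrd g N M i j)) (i : Int) (j : Int) = "-" := by
        rw [hval0]
        split_ifs
        · decide
        · exact hA
      have hval2 : ¬ pvGetCell (markW g (clrd g N M i j)) (i : Int) (j : Int) = "|" := by
        rw [hval0]
        split_ifs
        · decide
        · exact hB
      have hs : hsInd g i j = 0 := by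
        rw [hsInd, if_neg (by rintro ⟨h, _⟩; exact hA h)]
      have hv : vsInd g i j = 0 := by
        rw [vsInd, if_neg (by rintro ⟨h, _⟩; exact hB h)]
      have heq : markW g (clrd g N M i j) = markW g (clrd g N M i (j + 1)) :=
        markW_congr g _ _ (clrd_succ_eq g N M i j (by rintro ⟨h, _⟩; exact hA h)
          (by rintro ⟨h, _⟩; exact hB h))
      rw [← heq]
      simp [pvStep, hval1, hval2, hs, hv]
def windowSum (g : List (List String)) (N M : Int) : Int :=
  ∑ i ∈ Finset.range N.toNat, ∑ j ∈ Finset.range M.toNat, (hsInd g i j + vsInd g i j)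

theorem clrd_zero (g : List (List String)) (N M : Int) :
    ∀ r c, clrd g N M 0 0 r c = false := by
  intro r c
  rw [Bool.eq_false_iff, Ne, clrd_iff]
  rintro (⟨_, _, h⟩ | ⟨_, _, _, h⟩) <;> rcases h with h | ⟨_, h⟩ <;> omega

theorem clrd_row_end (g : List (List String)) (N M : Int) (i : Nat) :
    ∀ r c, clrd g N M i M.toNat r c = clrd g N M (i + 1) 0 r c := by
  intro r c
  rw [Bool.eq_iff_iff, clrd_iff, clrd_iff]
  constructor
  · rintro (⟨h1, h2, h3⟩ | ⟨h1, h2, h3, h4⟩)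
    · refine Or.inl ⟨h1, h2, Or.inl ?_⟩
      rcases h3 with h3 | ⟨h3, _⟩ <;> omega
    · refine Or.inr ⟨h1, h2, h3, Or.inl ?_⟩
      rcases h4 with h4 | ⟨h4, _⟩ <;> omega
  · rintro (⟨h1, h2, h3⟩ | ⟨h1, h2, h3, h4⟩)
    · refine Or.inl ⟨h1, h2, ?_⟩
      have hcm : c < M.toNat := by omega
      have := hstart_le g r c
      rcases h3 with h3 | ⟨h3, h4⟩
      · rcases Nat.lt_or_ge r i with hr | hr
        · exact Or.inl hr
        · have : r = i := by omega
          exact Or.inr ⟨this, by omega⟩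
      · omega
    · refine Or.inr ⟨h1, h2, h3, ?_⟩
      have hcm : c < M.toNat := by omega
      rcases h4 with h4 | ⟨h4, h5⟩
      · rcases Nat.lt_or_ge (vstart g c r) i with hr | hr
        · exact Or.inl hr
        · have : vstart g c r = i := by omega
          exact Or.inr ⟨this, by omega⟩
      · omega

theorem rowFoldA (g : List (List String)) (N M : Int) (i : Nat) (hiN : (i : Int) < N) :
    ∀ m', m' ≤ M.toNat → ∀ cnt,
      (List.range m').foldl
          (fun (st : List (List String) × Int) (k : Nat) => pvStep N M st (i : Int) (k : Int))
          (markW g (clrd g N M i 0), cnt) =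
        (markW g (clrd g N M i m'),
          cnt + ∑ j ∈ Finset.range m', (hsInd g i j + vsInd g i j)) := by
  intro m'
  induction m' with
  | zero => intro _ cnt; simp
  | succ m' ih =>
    intro hm cnt
    rw [List.range_succ, List.foldl_append, ih (by omega) cnt]
    simp only [List.foldl_cons, List.foldl_nil]
    rw [pvStep_mark g N M i m' _ hiN (by omega), Finset.sum_range_succ]
    congr 1
    ring

theorem gridFoldA (g : List (List String)) (N M : Int) :
    ∀ n', n' ≤ N.toNat →
      (List.range n').foldl
          (fun (st : List (List String) × Int) (k : Nat) => (List.range M.toNat).foldl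
            (fun (st' : List (List String) × Int) (j : Nat) => pvStep N M st' (k : Int) (j : Int)) st)
          (markW g (clrd g N M 0 0), 0) =
        (markW g (clrd g N M n' 0),
          ∑ i ∈ Finset.range n', ∑ j ∈ Finset.range M.toNat, (hsInd g i j + vsInd g i j)) := by
  intro n'
  induction n' with
  | zero => intro _; simp
  | succ n' ih =>
    intro hn
    rw [List.range_succ, List.foldl_append, ih (by omega)]
    simp only [List.foldl_cons, List.foldl_nil]
    rw [rowFoldA g N M n' (by omega) M.toNat le_rfl]
    rw [markW_congr g _ _ (clrd_row_end g N M n'), Finset.sum_range_succ]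

theorem A_eq_windowSum (N M : Int) (floor : List (List String)) :
    count_wooden_boards N M floor = windowSum floor N M := by
  unfold count_wooden_boards windowSum
  have hN : PySem.List.pyRange 0 N 1 = (List.range N.toNat).map (fun k : Nat => (k : Int)) := by
    rw [PySem.List.pyRange_one]
    simp
  have hM : PySem.List.pyRange 0 M 1 = (List.range M.toNat).map (fun k : Nat => (k : Int)) := by
    rw [PySem.List.pyRange_one]
    simp
  have hinit : floor = markW floor (clrd floor N M 0 0) :=
    (markW_false floor _ (clrd_zero floor N M)).symm
  rw [hN, hM]
  simp only [List.foldl_map]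
  conv_lhs => rw [hinit]
  rw [gridFoldA floor N M N.toNat le_rfl]
theorem rowFoldB (g : List (List String)) (i : Nat) :
    ∀ m' (acc : Int),
      (List.range m').foldl
          (fun (st : Bool × Int) (k : Nat) => pvRowStep g (i : Int) st (k : Int))
          (false, acc) =
        (decide (m' ≠ 0 ∧ cg g i (m' - 1) = "-"),
          acc + ∑ j ∈ Finset.range m', hsInd g i j) := by
  intro m'
  induction m' with
  | zero => intro acc; simp
  | succ m' ih =>
    intro acc
    rw [List.range_succ, List.foldl_append, ih acc]
    simp only [List.foldl_cons, List.foldl_nil, pvRowStep, pvGetCell_cg]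
    rw [Finset.sum_range_succ]
    by_cases hc : cg g i m' = "-"
    · by_cases hp : m' = 0 ∨ cg g i (m' - 1) ≠ "-"
      · have hh : hsInd g i m' = 1 := by
          rw [hsInd, if_pos ⟨hc, (hstart_eq_self_iff g i m').mpr hp⟩]
        have hprev : decide (m' ≠ 0 ∧ cg g i (m' - 1) = "-") = false := by
          simp only [decide_eq_false_iff_not]
          tauto
        rw [hprev, hh]
        simp [hc]
        ring
      · have hh : hsInd g i m' = 0 := by
          rw [hsInd, if_neg]
          rintro ⟨_, h2⟩
          exact hp ((hstart_eq_self_iff g i m').mp h2)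
        have hprev : decide (m' ≠ 0 ∧ cg g i (m' - 1) = "-") = true := by
          simp only [decide_eq_true_eq]
          tauto
        rw [hprev, hh]
        simp [hc]
    · have hh : hsInd g i m' = 0 := by
        rw [hsInd, if_neg (by rintro ⟨h, _⟩; exact hc h)]
      rw [hh]
      simp [hc]
theorem colFoldB (g : List (List String)) (j : Nat) :
    ∀ n' (acc : Int),
      (List.range n').foldl
          (fun (st : Bool × Int) (k : Nat) => pvColStep g (j : Int) st (k : Int))
          (false, acc) =
        (decide (n' ≠ 0 ∧ cg g (n' - 1) j = "|"),
          acc + ∑ i ∈ Finset.range n', vsInd g i j) := by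
  intro n'
  induction n' with
  | zero => intro acc; simp
  | succ n' ih =>
    intro acc
    rw [List.range_succ, List.foldl_append, ih acc]
    simp only [List.foldl_cons, List.foldl_nil, pvColStep, pvGetCell_cg]
    rw [Finset.sum_range_succ]
    by_cases hc : cg g n' j = "|"
    · by_cases hp : n' = 0 ∨ cg g (n' - 1) j ≠ "|"
      · have hh : vsInd g n' j = 1 := by
          rw [vsInd, if_pos ⟨hc, (vstart_eq_self_iff g j n').mpr hp⟩]
        have hprev : decide (n' ≠ 0 ∧ cg g (n' - 1) j = "|") = false := by
          simp only [decide_eq_false_iff_not]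
          tauto
        rw [hprev, hh]
        simp [hc]
        ring
      · have hh : vsInd g n' j = 0 := by
          rw [vsInd, if_neg]
          rintro ⟨_, h2⟩
          exact hp ((vstart_eq_self_iff g j n').mp h2)
        have hprev : decide (n' ≠ 0 ∧ cg g (n' - 1) j = "|") = true := by
          simp only [decide_eq_true_eq]
          tauto
        rw [hprev, hh]
        simp [hc]
    · have hh : vsInd g n' j = 0 := by
        rw [vsInd, if_neg (by rintro ⟨h, _⟩; exact hc h)]
      rw [hh]
      simp [hc]

theorem passFold (f : Nat → Int) :
    ∀ n (a0 : Int), (List.range n).foldl (fun (acc : Int) (k : Nat) => acc + f k) a0 =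
      a0 + ∑ k ∈ Finset.range n, f k := by
  intro n
  induction n with
  | zero => intro a0; simp
  | succ n ih =>
    intro a0
    rw [List.range_succ, List.foldl_append, ih a0]
    simp only [List.foldl_cons, List.foldl_nil]
    rw [Finset.sum_range_succ]
    ring

theorem B_eq_sums (N M : Int) (floor : List (List String)) :
    count_wooden_boards_alt N M floor =
      (∑ i ∈ Finset.range N.toNat, ∑ j ∈ Finset.range M.toNat, hsInd floor i j) +
      (∑ j ∈ Finset.range M.toNat, ∑ i ∈ Finset.range N.toNat, vsInd floor i j) := by
  unfold count_wooden_boards_alt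
  by_cases hNpos : 0 < N
  case neg =>
    have hn0 : N.toNat = 0 := by omega
    have hnil : PySem.List.pyRange 0 N 1 = [] :=
      PySem.List.pyRange_one_eq_nil (by omega)
    rw [if_neg hNpos, hnil]
    simp [hn0]
  rw [if_pos hNpos]
  have hN : PySem.List.pyRange 0 N 1 = (List.range N.toNat).map (fun k : Nat => (k : Int)) := by
    rw [PySem.List.pyRange_one]
    simp
  have hM : PySem.List.pyRange 0 M 1 = (List.range M.toNat).map (fun k : Nat => (k : Int)) := by
    rw [PySem.List.pyRange_one]
    simp
  rw [hN, hM]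
  simp only [List.foldl_map]
  have h1 : ∀ (i : Nat) (acc : Int),
      ((List.range M.toNat).foldl
        (fun (st : Bool × Int) (k : Nat) => pvRowStep floor (i : Int) st (k : Int)) (false, acc)).2 =
      acc + ∑ j ∈ Finset.range M.toNat, hsInd floor i j := by
    intro i acc
    rw [rowFoldB floor i M.toNat acc]
  have h2 : ∀ (j : Nat) (acc : Int),
      ((List.range N.toNat).foldl
        (fun (st : Bool × Int) (k : Nat) => pvColStep floor (j : Int) st (k : Int)) (false, acc)).2 =
      acc + ∑ i ∈ Finset.range N.toNat, vsInd floor i j := by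
    intro j acc
    rw [colFoldB floor j N.toNat acc]
  simp only [h1, h2]
  rw [passFold (fun i => ∑ j ∈ Finset.range M.toNat, hsInd floor i j) N.toNat 0,
      passFold (fun j => ∑ i ∈ Finset.range N.toNat, vsInd floor i j) M.toNat _]
  ring
-- ===== VERDICT (by name: the statement is the Claim_ definition above) =====
theorem count_wooden_boards_spec : Claim_equal_count_wooden_boards := by
  intro N M floor _ _
  unfold Spec_count_wooden_boards
  rw [A_eq_windowSum, B_eq_sums]
  unfold windowSum
  simp only [Finset.sum_add_distrib]
  rw [Finset.sum_comm (s := Finset.range N.toNat) (t := Finset.range M.toNat)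
    (f := fun i j => vsInd floor i j)]
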